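-- pv_equiv track=rewrite | github.com/chenfengzhen1008/cellBrowser | cellbrowser.py | countBinsBetweenBreaks
-- ===== SOURCE A (Python) =====
-- def countBinsBetweenBreaks(numVals, breakVals):
--     """ count how many numVals fall into the bins defined by breakVals.
--     Special handling for the last value. Comparison uses "<=". The first
--     break is assumed to be the minimum of numVals.
--     Also returns an array with the bin for every element in numVals
--     >>> countBinsBetweenBreaks([1,1,1,2,2,2,3,3,4,4,5,5,6,6], [1,2,3,5,6])
--     ([6, 2, 4, 2], [0, 0, 0, 0, 0, 0, 1, 1, 2, 2, 2, 2, 3, 3])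
--     """
--
--     binCounts = []
--     binCount = 0
--     i = 1
--     dArr = []
--     for x in numVals:
--         if x <= breakVals[i]:
--             binCount+=1
--         else:
--             binCounts.append(binCount)
--             binCount = 1
--             i += 1
--         dArr.append(i-1)
--
--     binCounts.append(binCount)
--
--     assert(len(dArr)==len(numVals))
--     assert(len(binCounts)==len(breakVals)-1)
--     return binCounts, dArr
-- ===== SOURCE B (Python) =====
-- def countBinsBetweenBreaks(numVals, breakVals):
--     """Fold-then-tabulate re-implementation: a pure step function threads the
--     (bin pointer, reversed bin list) state over numVals; the per-bin counts are
--     then tabulated from the bin array in a second pass."""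
--     def step(st, x):
--         i, rev = st
--         j = i if x <= breakVals[i] else i + 1
--         return (j, [j - 1] + rev)
--
--     st = (1, [])
--     for x in numVals:
--         st = step(st, x)
--     i, rev = st
--     dArr = rev[::-1]
--
--     binCounts = [0] * i
--     for b in dArr:
--         binCounts[b] += 1
--
--     assert(len(dArr) == len(numVals))
--     assert(len(binCounts) == len(breakVals) - 1)
--     return binCounts, dArr
-- ===== Notes on version B (the rewrite author's own statement) =====
-- stated objective: alternative
-- what changed: Replaces A's fused imperative loop (which interleaves bin assignment with running-count bookkeeping via binCount/binCounts.append) by a fold of a pure step function that threads only (bin pointer, reversed bin list) and is reversed at the end, followed by a separate tabulation pass that counts the per-bin occurrences into a table sized by the final pointer; Pre_ is exactly the set of inputs on which A returns (each interior break crossed in order, nothing after the last crossing above the final break), excluding only the inputs where both A and B raise IndexError/AssertionError identically.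
import Mathlib
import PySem

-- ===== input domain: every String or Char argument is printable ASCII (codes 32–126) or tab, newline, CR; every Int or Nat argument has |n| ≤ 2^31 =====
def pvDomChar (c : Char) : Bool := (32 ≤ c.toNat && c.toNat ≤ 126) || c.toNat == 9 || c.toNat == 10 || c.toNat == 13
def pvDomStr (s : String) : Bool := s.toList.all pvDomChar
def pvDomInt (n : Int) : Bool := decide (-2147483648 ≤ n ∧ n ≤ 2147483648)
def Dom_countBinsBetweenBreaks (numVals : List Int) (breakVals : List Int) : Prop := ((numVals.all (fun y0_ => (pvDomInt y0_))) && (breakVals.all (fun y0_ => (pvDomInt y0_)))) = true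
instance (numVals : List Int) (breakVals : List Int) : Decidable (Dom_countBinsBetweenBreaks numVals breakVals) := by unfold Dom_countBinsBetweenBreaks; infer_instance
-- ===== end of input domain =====

-- B replaces A's fused imperative loop (interleaving bin assignment with running-count
-- bookkeeping) by a fold of a pure step function that threads only (pointer, reversed bin
-- list), followed by a separate tabulation pass for the per-bin counts; objective:
-- alternative. The equivalence is total: the two ports agree on every input (where the
-- Pythons raise — IndexError/AssertionError, identically in both — the ports return ([], [])).

-- ===== PORT A =====
-- the for-loop of A; none = IndexError from breakVals[i]
def pvALoop (breakVals : List Int) : List Int → List Int → Int → Int → List Int →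
    Option (List Int × Int × Int × List Int)
  | [], binCounts, binCount, i, dArr => some (binCounts, binCount, i, dArr)
  | x :: rest, binCounts, binCount, i, dArr =>
    match PySem.List.pyGet? breakVals i with
    | none => none
    | some b =>
      if x ≤ b then pvALoop breakVals rest binCounts (binCount + 1) i (dArr ++ [i - 1])
      else pvALoop breakVals rest (binCounts ++ [binCount]) 1 (i + 1) (dArr ++ [(i + 1) - 1])

def countBinsBetweenBreaks (numVals : List Int) (breakVals : List Int) : List Int × List Int :=
  match pvALoop breakVals numVals [] 0 1 [] with
  | none => ([], [])
  | some (binCounts, binCount, _i, dArr) =>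
    let binCounts := binCounts ++ [binCount]
    if ((dArr.length : Int) = (numVals.length : Int)) ∧
       ((binCounts.length : Int) = (breakVals.length : Int) - 1)
    then (binCounts, dArr) else ([], [])

-- ===== PORT B =====
-- B's pure step function: threads (pointer, reversed bin list); none = IndexError as in A
def pvBStep (breakVals : List Int) (st : Option (Int × List Int)) (x : Int) :
    Option (Int × List Int) :=
  st.bind (fun s =>
    (PySem.List.pyGet? breakVals s.1).map (fun b =>
      let j := if x ≤ b then s.1 else s.1 + 1
      (j, (j - 1) :: s.2)))

def countBinsBetweenBreaks_alt (numVals : List Int) (breakVals : List Int) : List Int × List Int :=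
  match numVals.foldl (pvBStep breakVals) (some (1, [])) with
  | none => ([], [])
  | some (i, rev) =>
    let dArr := rev.reverse
    let binCounts := dArr.foldl
      (fun cs b => PySem.List.pySetD cs b (PySem.List.pyGetD cs b 0 + 1))
      (List.replicate i.toNat (0 : Int))
    if ((dArr.length : Int) = (numVals.length : Int)) ∧
       ((binCounts.length : Int) = (breakVals.length : Int) - 1)
    then (binCounts, dArr) else ([], [])

-- ===== PRECONDITION & SPEC =====
-- Pre_ characterises exactly the inputs on which Python A returns: at least two breaks,
-- each interior break breakVals[1..m-2] is crossed in order (scanning numVals left to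
-- right, some value after the previous crossing exceeds it), and no value after the last
-- interior crossing exceeds the final break. Otherwise A raises (IndexError from
-- breakVals[i], or AssertionError on the bin count) — and Python B raises identically.

-- the suffix of xs after the first element exceeding b; none if no element exceeds b
def pvAfterCross (b : Int) : List Int → Option (List Int)
  | [] => none
  | x :: r => if b < x then some r else pvAfterCross b r

-- each break of bs is crossed in order, and everything after the last crossing is ≤ last
def pvCrossChain (last : Int) : List Int → List Int → Bool
  | xs, [] => xs.all (fun x => decide (x ≤ last))
  | xs, b :: bs =>
    match pvAfterCross b xs with
    | none => false
    | some rest => pvCrossChain last rest bs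

def Pre_countBinsBetweenBreaks (numVals : List Int) (breakVals : List Int) : Prop :=
  2 ≤ breakVals.length ∧
  pvCrossChain (breakVals.getD (breakVals.length - 1) 0) numVals
    ((breakVals.drop 1).dropLast) = true
instance (numVals : List Int) (breakVals : List Int) : Decidable (Pre_countBinsBetweenBreaks numVals breakVals) := by unfold Pre_countBinsBetweenBreaks; infer_instance

def pvWitness_countBinsBetweenBreaks : List Int × List Int :=
  ([1, 1, 1, 2, 2, 2, 3, 3, 4, 4, 5, 5, 6, 6], [1, 2, 3, 5, 6])

def Spec_countBinsBetweenBreaks (numVals : List Int) (breakVals : List Int) (out : List Int × List Int) : Prop := out = countBinsBetweenBreaks_alt numVals breakVals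
instance (numVals : List Int) (breakVals : List Int) (out : List Int × List Int) : Decidable (Spec_countBinsBetweenBreaks numVals breakVals out) := by unfold Spec_countBinsBetweenBreaks; infer_instance

-- ===== CLAIM (what is proved, stated in full; the proofs are below) =====
def Claim_equal_countBinsBetweenBreaks : Prop := ∀ (numVals : List Int) (breakVals : List Int), Dom_countBinsBetweenBreaks numVals breakVals → Pre_countBinsBetweenBreaks numVals breakVals → Spec_countBinsBetweenBreaks numVals breakVals (countBinsBetweenBreaks numVals breakVals)

-- ===== LEMMAS AND PROOFS =====

-- proof-side normal form of B's fold: the pointer walk with the bin trace in forward order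
def pvWalk (bv : List Int) : List Int → Int → Option (Int × List Int)
  | [], i => some (i, [])
  | x :: rest, i =>
    match PySem.List.pyGet? bv i with
    | none => none
    | some b =>
      let j := if x ≤ b then i else i + 1
      (pvWalk bv rest j).map (fun p => (p.1, (j - 1) :: p.2))

theorem pvFold_none (bv : List Int) :
    ∀ (xs : List Int), xs.foldl (pvBStep bv) none = none := by
  intro xs
  induction xs with
  | nil => rfl
  | cons x rest ih => simpa [pvBStep] using ih

theorem pvFold_eq_walk (bv : List Int) :
    ∀ (xs : List Int) (i : Int) (rev : List Int),
      xs.foldl (pvBStep bv) (some (i, rev))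
        = (pvWalk bv xs i).map (fun p => (p.1, p.2.reverse ++ rev)) := by
  intro xs
  induction xs with
  | nil => intro i rev; simp [pvWalk]
  | cons x rest ih =>
    intro i rev
    rw [List.foldl_cons, pvWalk]
    cases hg : PySem.List.pyGet? bv i with
    | none => simp [pvBStep, hg, pvFold_none]
    | some b =>
      simp only [pvBStep, hg, Option.bind_some, Option.map_some]
      by_cases hxb : x ≤ b
      · simp only [if_pos hxb]
        rw [ih]
        cases pvWalk bv rest i <;> simp
      · simp only [if_neg hxb]
        rw [ih]
        cases pvWalk bv rest (i + 1) <;> simp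

theorem pvWalk_bounds (bv : List Int) :
    ∀ (rest : List Int) (i i' : Int) (tr : List Int),
      pvWalk bv rest i = some (i', tr) → i ≤ i' ∧ ∀ v ∈ tr, i - 1 ≤ v ∧ v ≤ i' - 1 := by
  intro rest
  induction rest with
  | nil =>
    intro i i' tr h
    rw [pvWalk] at h
    injection h with h
    injection h with h1 h2
    subst h1; subst h2
    exact ⟨le_refl _, by simp⟩
  | cons x rest ih =>
    intro i i' tr h
    rw [pvWalk] at h
    cases hg : PySem.List.pyGet? bv i with
    | none => rw [hg] at h; exact absurd h (by simp)
    | some b =>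
      rw [hg] at h
      simp only [] at h
      by_cases hxb : x ≤ b
      · rw [if_pos hxb] at h
        cases hW : pvWalk bv rest i with
        | none => rw [hW] at h; exact absurd h (by simp)
        | some p =>
          obtain ⟨i0, tr0⟩ := p
          rw [hW] at h
          have hinj : i0 = i' ∧ (i - 1) :: tr0 = tr := by simpa using h
          obtain ⟨h1, h2⟩ := hinj
          obtain ⟨hle, hb⟩ := ih i i0 tr0 hW
          refine ⟨h1 ▸ hle, ?_⟩
          intro v hv
          rw [← h2] at hv
          rcases List.mem_cons.mp hv with rfl | hv'
          · constructor <;> omega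
          · have := hb v hv'; rw [← h1]; exact this
      · rw [if_neg hxb] at h
        cases hW : pvWalk bv rest (i + 1) with
        | none => rw [hW] at h; exact absurd h (by simp)
        | some p =>
          obtain ⟨i0, tr0⟩ := p
          rw [hW] at h
          have hinj : i0 = i' ∧ i :: tr0 = tr := by
            simpa [show i + 1 - 1 = i from by ring] using h
          obtain ⟨h1, h2⟩ := hinj
          obtain ⟨hle, hb⟩ := ih (i + 1) i0 tr0 hW
          rw [← h1]
          refine ⟨by omega, ?_⟩
          intro v hv
          rw [← h2] at hv
          rcases List.mem_cons.mp hv with rfl | hv'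
          · constructor <;> omega
          · have := hb v hv'; constructor <;> omega

theorem pvAB_inv (bv : List Int) :
    ∀ (rest : List Int) (i : Int) (C : List Int) (c : Int) (dA : List Int),
      (pvWalk bv rest i = none → pvALoop bv rest C c i dA = none) ∧
      (∀ i' tr, pvWalk bv rest i = some (i', tr) →
        ∃ C' c', pvALoop bv rest C c i dA = some (C', c', i', dA ++ tr) ∧
          C' ++ [c'] = C ++ [c + (tr.count (i - 1) : Int)] ++
            (List.range (i' - i).toNat).map (fun j : Nat => ((tr.count (i + (j : Int)) : Int)))) := by
  intro rest
  induction rest with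
  | nil =>
    intro i C c dA
    constructor
    · intro h; exact absurd h (by simp [pvWalk])
    · intro i' tr h
      rw [pvWalk] at h
      injection h with h
      injection h with h1 h2
      subst h1; subst h2
      refine ⟨C, c, by simp [pvALoop], ?_⟩
      simp
  | cons x rest ih =>
    intro i C c dA
    constructor
    · intro h
      rw [pvWalk] at h
      rw [pvALoop]
      cases hg : PySem.List.pyGet? bv i with
      | none => simp
      | some b =>
        rw [hg] at h
        simp only [] at h ⊢
        by_cases hxb : x ≤ b
        · rw [if_pos hxb] at h ⊢
          cases hW : pvWalk bv rest i with
          | none => exact (ih i C (c + 1) (dA ++ [i - 1])).1 hW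
          | some p => rw [hW] at h; exact absurd h (by simp)
        · rw [if_neg hxb] at h ⊢
          cases hW : pvWalk bv rest (i + 1) with
          | none => exact (ih (i + 1) (C ++ [c]) 1 (dA ++ [i + 1 - 1])).1 hW
          | some p => rw [hW] at h; exact absurd h (by simp)
    · intro i' tr h
      rw [pvWalk] at h
      rw [pvALoop]
      cases hg : PySem.List.pyGet? bv i with
      | none => rw [hg] at h; exact absurd h (by simp)
      | some b =>
        rw [hg] at h
        simp only [] at h ⊢
        by_cases hxb : x ≤ b
        · rw [if_pos hxb] at h ⊢
          cases hW : pvWalk bv rest i with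
          | none => rw [hW] at h; exact absurd h (by simp)
          | some p =>
            obtain ⟨i0, tr0⟩ := p
            rw [hW] at h
            have hinj : i0 = i' ∧ (i - 1) :: tr0 = tr := by simpa using h
            obtain ⟨h1, h2⟩ := hinj
            obtain ⟨C', c', hA, hC⟩ := (ih i C (c + 1) (dA ++ [i - 1])).2 i0 tr0 hW
            refine ⟨C', c', ?_, ?_⟩
            · rw [hA, ← h2, h1]; simp
            · rw [hC, ← h2, ← h1]
              have e1 : (((i - 1) :: tr0).count (i - 1) : Int) = (tr0.count (i - 1) : Int) + 1 := by
                rw [List.count_cons_self]; push_cast; ring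
              rw [e1]
              have e2 : ∀ j : Nat, ((i - 1) :: tr0).count (i + (j : Int)) = tr0.count (i + (j : Int)) := by
                intro j
                exact List.count_cons_of_ne (by omega)
              congr 1
              · congr 1; ring
              · exact (List.map_congr_left (fun j _ => by rw [e2 j])).symm
        · rw [if_neg hxb] at h ⊢
          cases hW : pvWalk bv rest (i + 1) with
          | none => rw [hW] at h; exact absurd h (by simp)
          | some p =>
            obtain ⟨i0, tr0⟩ := p
            rw [hW] at h
            have hinj : i0 = i' ∧ i :: tr0 = tr := by
              simpa [show i + 1 - 1 = i from by ring] using h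
            obtain ⟨h1, h2⟩ := hinj
            obtain ⟨C', c', hA, hC⟩ := (ih (i + 1) (C ++ [c]) 1 (dA ++ [i + 1 - 1])).2 i0 tr0 hW
            obtain ⟨hle, hbnd⟩ := pvWalk_bounds bv rest (i + 1) i0 tr0 hW
            refine ⟨C', c', ?_, ?_⟩
            · rw [hA, ← h2, h1]
              have : i + 1 - 1 = i := by ring
              simp [this]
            · rw [hC, ← h2, ← h1]
              have hc0 : tr0.count (i - 1) = 0 := by
                rw [List.count_eq_zero]
                intro hmem
                have := hbnd _ hmem
                omega
              have e1 : ((i :: tr0).count (i - 1) : Int) = 0 := by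
                rw [List.count_cons_of_ne (by omega), hc0]
                norm_num
              rw [e1]
              have em : (i0 - i).toNat = (i0 - (i + 1)).toNat + 1 := by omega
              rw [em, List.range_succ_eq_map, List.map_cons, List.map_map]
              have e0 : ((i :: tr0).count (i + ((0 : Nat) : Int)) : Int)
                  = 1 + (tr0.count (i + 1 - 1) : Int) := by
                rw [show i + ((0 : Nat) : Int) = i from by push_cast; ring,
                    show i + 1 - 1 = i from by ring, List.count_cons_self]
                push_cast; ring
              rw [e0]
              have etail : ∀ j : Nat,
                  ((fun j : Nat => ((i :: tr0).count (i + (j : Int)) : Int)) ∘ Nat.succ) j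
                  = (fun j : Nat => ((tr0.count (i + 1 + (j : Int)) : Int))) j := by
                intro j
                simp only [Function.comp]
                rw [List.count_cons_of_ne (by push_cast; omega)]
                congr 2
                push_cast; ring
              rw [List.map_congr_left (fun j _ => etail j)]
              simp [List.append_assoc]

theorem pvTabI :
    ∀ (ds : List Int) (cs : List Int), (∀ v ∈ ds, 0 ≤ v ∧ v < (cs.length : Int)) →
      ds.foldl (fun cs b => PySem.List.pySetD cs b (PySem.List.pyGetD cs b 0 + 1)) cs
        = (List.range cs.length).map (fun j => cs.getD j 0 + (ds.count ((j : Nat) : Int) : Int)) := by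
  intro ds
  induction ds with
  | nil =>
    intro cs _
    apply List.ext_getElem (by simp)
    intro j h1 h2
    simp at h1 ⊢
    simp [List.getElem?_eq_getElem h1]
  | cons v rest ih =>
    intro cs hb
    obtain ⟨hv0, hvl⟩ := hb v (by simp)
    obtain ⟨k, rfl⟩ : ∃ k : Nat, v = (k : Int) := ⟨v.toNat, by omega⟩
    have hk : k < cs.length := by exact_mod_cast hvl
    have hstep : PySem.List.pySetD cs (k : Int) (PySem.List.pyGetD cs (k : Int) 0 + 1)
        = cs.set k (cs.getD k 0 + 1) := by
      simp
    rw [List.foldl_cons, hstep]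
    rw [ih (cs.set k (cs.getD k 0 + 1))
        (by intro w hw; have := hb w (by simp [hw]); simpa using this)]
    simp only [List.length_set]
    apply List.map_congr_left
    intro j hj
    simp at hj
    have hj' : j < cs.length := hj
    have hset : (cs.set k (cs.getD k 0 + 1)).getD j 0 =
        if j = k then cs.getD k 0 + 1 else cs.getD j 0 := by
      have hjs : j < (cs.set k (cs.getD k 0 + 1)).length := by simp; omega
      rw [List.getD_eq_getElem _ 0 hjs, List.getElem_set]
      by_cases h : j = k
      · simp [h]
      · have hne : ¬ k = j := fun e => h e.symm
        simp [h, hne, List.getElem?_eq_getElem hj']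
    rw [hset, List.count_cons]
    by_cases h : j = k
    · subst h
      rw [if_pos rfl]
      simp only [beq_iff_eq]
      push_cast; ring
    · rw [if_neg h]
      simp [Ne.symm h]

theorem pvMainEq (numVals breakVals : List Int) :
    countBinsBetweenBreaks numVals breakVals = countBinsBetweenBreaks_alt numVals breakVals := by
  rw [countBinsBetweenBreaks, countBinsBetweenBreaks_alt,
      pvFold_eq_walk breakVals numVals 1 []]
  cases hW : pvWalk breakVals numVals 1 with
  | none =>
    rw [(pvAB_inv breakVals numVals 1 [] 0 []).1 hW]
    simp
  | some p =>
    obtain ⟨i', tr⟩ := p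
    obtain ⟨C', c', hA, hC⟩ := (pvAB_inv breakVals numVals 1 [] 0 []).2 i' tr hW
    obtain ⟨hle, hbnd⟩ := pvWalk_bounds breakVals numVals 1 i' tr hW
    rw [hA]
    simp only [Option.map_some, List.append_nil, List.reverse_reverse, List.nil_append]
    have hlen0 : (List.replicate i'.toNat (0 : Int)).length = i'.toNat := by simp
    have htab := pvTabI tr (List.replicate i'.toNat (0 : Int))
      (by
        intro v hv
        have := hbnd v hv
        rw [hlen0]
        constructor <;> omega)
    have hz : ∀ (m j : Nat), (List.replicate m (0 : Int)).getD j 0 = 0 := by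
      intro m j; simp [List.getD]
    have hCeq : C' ++ [c'] = tr.foldl
        (fun cs b => PySem.List.pySetD cs b (PySem.List.pyGetD cs b 0 + 1))
        (List.replicate i'.toNat (0 : Int)) := by
      rw [htab, hlen0, hC]
      rw [show i'.toNat = (i' - 1).toNat + 1 from by omega,
          List.range_succ_eq_map, List.map_cons, List.map_map]
      simp only [List.nil_append, List.singleton_append, List.cons_eq_cons]
      refine ⟨?_, ?_⟩
      · rw [hz ((i' - 1).toNat + 1) 0]
        norm_num
      · apply List.map_congr_left
        intro j _
        simp only [Function.comp_apply, hz, zero_add]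
        push_cast
        congr 2
        omega
    rw [← hCeq]

-- ===== VERDICT (by name: the statement is the Claim_ definition above) =====
theorem countBinsBetweenBreaks_spec : Claim_equal_countBinsBetweenBreaks := by
  intro numVals breakVals _ _
  exact pvMainEq numVals breakVals
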